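-- pv_equiv track=rewrite | github.com/xuhongzhi/ParaMA2 | stemchange.py | __index_seg_sub
-- ===== SOURCE A (Python) =====
-- def __index_seg_sub(seg, indx):
--     r_indx = 0
--     for i in range(len(seg)):
--         sub_len = len(seg[i])
--         if r_indx + sub_len > indx:
--             return i, indx - r_indx
--         else:
--             r_indx += sub_len
--     raise Exception('Segment index error: %s' % indx)
-- ===== SOURCE B (Python) =====
-- def __index_seg_sub(seg, indx):
--     # prefix-sum + binary search: ends[i] = total length of seg[0..i]
--     ends = []
--     total = 0
--     for s in seg:
--         total += len(s)
--         ends.append(total)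
--     lo, hi = 0, len(ends)
--     while lo < hi:
--         mid = (lo + hi) // 2
--         if ends[mid] <= indx:
--             lo = mid + 1
--         else:
--             hi = mid
--     if lo == len(seg):
--         raise Exception('Segment index error: %s' % indx)
--     return lo, indx - (ends[lo] - len(seg[lo]))
-- ===== Notes on version B (the rewrite author's own statement) =====
-- stated objective: alternative
-- what changed: A's single early-return scan with a running offset is replaced by building the list of cumulative end-offsets once and locating the segment with a hand-written binary search (bisect_right), recovering the offset arithmetically.
import Mathlib
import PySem

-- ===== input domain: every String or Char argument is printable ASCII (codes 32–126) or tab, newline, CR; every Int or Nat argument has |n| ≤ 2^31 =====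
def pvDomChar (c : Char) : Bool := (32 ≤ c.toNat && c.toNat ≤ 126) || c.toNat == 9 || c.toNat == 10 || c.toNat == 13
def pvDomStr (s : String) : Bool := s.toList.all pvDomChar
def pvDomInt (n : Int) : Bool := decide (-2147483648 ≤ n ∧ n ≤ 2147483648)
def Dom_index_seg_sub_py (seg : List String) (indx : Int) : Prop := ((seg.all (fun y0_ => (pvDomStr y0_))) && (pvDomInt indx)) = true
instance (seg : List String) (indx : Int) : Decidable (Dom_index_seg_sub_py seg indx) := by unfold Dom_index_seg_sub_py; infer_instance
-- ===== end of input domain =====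

-- B replaces A's early-return scan with prefix end-offsets plus a binary search (alternative decomposition, same results).


-- ===== PORT A =====
-- the 'for i in range(len(seg))' loop of A, as structural recursion carrying i and r_indx;
-- 'none' is the final 'raise Exception(...)' (excluded by Pre_)
def pvLoopA : List String → Int → Int → Int → Option (Int × Int)
  | [], _, _, _ => none
  | s :: rest, indx, i, r =>
    if r + PySem.Str.len s > indx then some (i, indx - r)
    else pvLoopA rest indx (i + 1) (r + PySem.Str.len s)

def index_seg_sub_py (seg : List String) (indx : Int) : Int × Int :=
  (pvLoopA seg indx 0 0).getD (0, 0)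

-- ===== PORT B =====
-- ends[i] = total length of seg[0..i], built in one pass (the first loop of Source B)
def pvBuildEnds : List String → Int → List Int
  | [], _ => []
  | s :: rest, t => (t + PySem.Str.len s) :: pvBuildEnds rest (t + PySem.Str.len s)

-- the hand-written bisect_right 'while lo < hi' loop of Source B; fuel = initial hi - lo suffices
def pvBsr (ends : List Int) (x : Int) : Nat → Nat → Nat → Nat
  | 0, lo, _ => lo
  | fuel + 1, lo, hi =>
    if lo < hi then
      let mid := (lo + hi) / 2
      if ends.getD mid 0 ≤ x then pvBsr ends x fuel (mid + 1) hi
      else pvBsr ends x fuel lo mid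
    else lo

def index_seg_sub_py_alt (seg : List String) (indx : Int) : Int × Int :=
  let ends := pvBuildEnds seg 0
  let lo := pvBsr ends indx ends.length 0 ends.length
  if lo = seg.length then (0, 0)  -- the 'raise' of Source B (excluded by Pre_)
  else ((lo : Int), indx - (ends.getD lo 0 - PySem.Str.len (seg.getD lo "")))

-- ===== PRECONDITION & SPEC =====
-- A raises ('Segment index error') exactly when indx ≥ the total length of all segments
-- (in particular always on seg = []); B raises on the same inputs, so both are excluded.
def Pre_index_seg_sub_py (seg : List String) (indx : Int) : Prop :=
  seg ≠ [] ∧ indx < (seg.map PySem.Str.len).sum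
instance (seg : List String) (indx : Int) : Decidable (Pre_index_seg_sub_py seg indx) := by
  unfold Pre_index_seg_sub_py; infer_instance

def pvWitness_index_seg_sub_py : List String × Int := (["ab", "c"], 2)

def Spec_index_seg_sub_py (seg : List String) (indx : Int) (out : Int × Int) : Prop := out = index_seg_sub_py_alt seg indx
instance (seg : List String) (indx : Int) (out : Int × Int) : Decidable (Spec_index_seg_sub_py seg indx out) := by unfold Spec_index_seg_sub_py; infer_instance

-- ===== CLAIM (what is proved, stated in full; the proofs are below) =====
def Claim_equal_index_seg_sub_py : Prop := ∀ (seg : List String) (indx : Int), Dom_index_seg_sub_py seg indx → Pre_index_seg_sub_py seg indx → Spec_index_seg_sub_py seg indx (index_seg_sub_py seg indx)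

-- ===== LEMMAS AND PROOFS =====

-- cumulative length of the first k segments
def pvCum : List String → Nat → Int
  | _, 0 => 0
  | [], _ + 1 => 0
  | s :: rest, k + 1 => PySem.Str.len s + pvCum rest k

theorem pvStrLen_nonneg (s : String) : 0 ≤ PySem.Str.len s := by
  simp [PySem.Str.len_eq]

theorem pvCum_mono : ∀ (seg : List String) (j k : Nat), j ≤ k → pvCum seg j ≤ pvCum seg k := by
  intro seg
  induction seg with
  | nil => intro j k _; cases j <;> cases k <;> simp [pvCum]
  | cons s rest ih =>
    intro j k hjk
    cases j with
    | zero =>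
      cases k with
      | zero => simp
      | succ k' =>
        have h1 := pvStrLen_nonneg s
        have h2 := ih 0 k' (Nat.zero_le _)
        simp [pvCum] at h2 ⊢
        omega
    | succ j' =>
      cases k with
      | zero => omega
      | succ k' =>
        have := ih j' k' (by omega)
        simp [pvCum]
        omega

theorem pvCum_total : ∀ (seg : List String), pvCum seg seg.length = (seg.map PySem.Str.len).sum := by
  intro seg
  induction seg with
  | nil => simp [pvCum]
  | cons s rest ih => simp [pvCum, ih]

theorem pvCum_step : ∀ (seg : List String) (j : Nat), j < seg.length →
    pvCum seg (j + 1) = pvCum seg j + PySem.Str.len (seg.getD j "") := by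
  intro seg
  induction seg with
  | nil => intro j h; simp at h
  | cons s rest ih =>
    intro j h
    cases j with
    | zero => simp [pvCum]
    | succ j' =>
      have := ih j' (by simpa using h)
      simp [pvCum, this]
      ring

theorem pvBuildEnds_length : ∀ (seg : List String) (t : Int), (pvBuildEnds seg t).length = seg.length := by
  intro seg
  induction seg with
  | nil => intro t; simp [pvBuildEnds]
  | cons s rest ih => intro t; simp [pvBuildEnds, ih]

theorem pvBuildEnds_getD : ∀ (seg : List String) (t : Int) (j : Nat), j < seg.length →
    (pvBuildEnds seg t).getD j 0 = t + pvCum seg (j + 1) := by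
  intro seg
  induction seg with
  | nil => intro t j h; simp at h
  | cons s rest ih =>
    intro t j h
    cases j with
    | zero => simp [pvBuildEnds, pvCum]
    | succ j' =>
      have h' : j' < rest.length := by simpa using h
      rw [pvBuildEnds, List.getD_cons_succ, ih (t + PySem.Str.len s) j' h', pvCum]
      ring

theorem pvBsr_spec (ends : List Int) (x : Int)
    (hmono : ∀ j k : Nat, j ≤ k → k < ends.length → ends.getD j 0 ≤ ends.getD k 0) :
    ∀ (fuel lo hi : Nat), hi ≤ ends.length → lo ≤ hi → hi - lo ≤ fuel →
    (∀ j, j < lo → ends.getD j 0 ≤ x) →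
    (∀ j, hi ≤ j → j < ends.length → x < ends.getD j 0) →
    pvBsr ends x fuel lo hi ≤ ends.length ∧
    (∀ j, j < pvBsr ends x fuel lo hi → ends.getD j 0 ≤ x) ∧
    (∀ j, pvBsr ends x fuel lo hi ≤ j → j < ends.length → x < ends.getD j 0) := by
  intro fuel
  induction fuel with
  | zero =>
    intro lo hi hhi hlh hfuel hlo hhi2
    have : lo = hi := by omega
    subst this
    simp only [pvBsr]
    exact ⟨by omega, hlo, hhi2⟩
  | succ fuel ih =>
    intro lo hi hhi hlh hfuel hlo hhi2
    by_cases hcase : lo < hi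
    · have hmidlt : (lo + hi) / 2 < hi := by omega
      have hmidge : lo ≤ (lo + hi) / 2 := by omega
      by_cases hv : ends.getD ((lo + hi) / 2) 0 ≤ x
      · have hrec := ih ((lo + hi) / 2 + 1) hi hhi (by omega) (by omega)
          (fun j hj => by
            by_cases hjlo : j < lo
            · exact hlo j hjlo
            · exact le_trans (hmono j ((lo + hi) / 2) (by omega) (by omega)) hv)
          hhi2
        rw [pvBsr, if_pos hcase]
        simpa only [hv, if_pos] using hrec
      · have hrec := ih lo ((lo + hi) / 2) (by omega) (by omega) (by omega) hlo
          (fun j hj1 hj2 =>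
            lt_of_lt_of_le (by omega : x < ends.getD ((lo + hi) / 2) 0)
              (hmono ((lo + hi) / 2) j hj1 hj2))
        rw [pvBsr, if_pos hcase]
        simpa only [hv, if_neg, if_false] using hrec
    · have : lo = hi := by omega
      subst this
      rw [pvBsr, if_neg hcase]
      exact ⟨by omega, hlo, hhi2⟩

-- A's loop returns the segment index r and offset once r is characterised as the first
-- cumulative end-offset exceeding indx
theorem pvLoopA_eq : ∀ (seg : List String) (x racc i : Int) (r : Nat),
    r < seg.length →
    (∀ j : Nat, j < r → racc + pvCum seg (j + 1) ≤ x) →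
    x < racc + pvCum seg (r + 1) →
    pvLoopA seg x i racc = some (i + (r : Int), x - (racc + pvCum seg r)) := by
  intro seg
  induction seg with
  | nil => intro x racc i r h; simp at h
  | cons s rest ih =>
    intro x racc i r hr hbelow habove
    cases r with
    | zero =>
      have hgt : racc + PySem.Str.len s > x := by
        have := habove
        simp only [pvCum] at this
        omega
      rw [pvLoopA, if_pos hgt]
      simp only [pvCum, Nat.cast_zero, add_zero]
    | succ r' =>
      have hskip : ¬ (racc + PySem.Str.len s > x) := by
        have := hbelow 0 (by omega)
        simp only [pvCum] at this
        omega
      have hrec := ih x (racc + PySem.Str.len s) (i + 1) r' (by simpa using hr)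
        (fun j hj => by
          have := hbelow (j + 1) (by omega)
          simp only [pvCum] at this
          omega)
        (by
          have := habove
          simp only [pvCum] at this
          omega)
      rw [pvLoopA, if_neg hskip, hrec, pvCum]
      simp only [Option.some.injEq, Prod.mk.injEq]
      constructor
      · push_cast; ring
      · ring

theorem pv_main : ∀ (seg : List String) (indx : Int), Pre_index_seg_sub_py seg indx →
    index_seg_sub_py seg indx = index_seg_sub_py_alt seg indx := by
  intro seg indx ⟨hne, hlt⟩
  have hn : 0 < seg.length := List.length_pos_of_ne_nil hne
  set ends := pvBuildEnds seg 0 with hends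
  have hlen : ends.length = seg.length := pvBuildEnds_length seg 0
  have hget : ∀ j : Nat, j < seg.length → ends.getD j 0 = pvCum seg (j + 1) := by
    intro j hj
    rw [hends, pvBuildEnds_getD seg 0 j hj]
    ring
  have hmono : ∀ j k : Nat, j ≤ k → k < ends.length → ends.getD j 0 ≤ ends.getD k 0 := by
    intro j k hjk hk
    rw [hget j (by omega), hget k (by omega)]
    exact pvCum_mono seg (j + 1) (k + 1) (by omega)
  obtain ⟨hr1, hr2, hr3⟩ := pvBsr_spec ends indx hmono ends.length 0 ends.length
    (le_refl _) (Nat.zero_le _) (by omega) (by omega) (by omega)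
  set r := pvBsr ends indx ends.length 0 ends.length with hrdef
  have hrlt : r < seg.length := by
    by_contra hge
    have hr : seg.length ≤ r := by omega
    have := hr2 (seg.length - 1) (by omega)
    rw [hget (seg.length - 1) (by omega)] at this
    have heq : seg.length - 1 + 1 = seg.length := by omega
    rw [heq, pvCum_total] at this
    omega
  have habove : indx < pvCum seg (r + 1) := by
    have := hr3 r (le_refl _) (by omega)
    rwa [hget r hrlt] at this
  have hbelow : ∀ j : Nat, j < r → pvCum seg (j + 1) ≤ indx := by
    intro j hj
    have := hr2 j hj
    rwa [hget j (by omega)] at this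
  have hA : pvLoopA seg indx 0 0 = some ((r : Int), indx - pvCum seg r) := by
    have := pvLoopA_eq seg indx 0 0 r hrlt
      (fun j hj => by simpa using hbelow j hj) (by simpa using habove)
    simpa using this
  have hB : index_seg_sub_py_alt seg indx
      = ((r : Int), indx - (ends.getD r 0 - PySem.Str.len (seg.getD r ""))) := by
    rw [index_seg_sub_py_alt]
    simp only [← hends, ← hrdef]
    rw [if_neg (by omega)]
  rw [index_seg_sub_py, hA, hB]
  simp only [Option.getD_some]
  rw [hget r hrlt, pvCum_step seg r hrlt]
  ring_nf

-- ===== VERDICT (by name: the statement is the Claim_ definition above) =====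
theorem index_seg_sub_py_spec : Claim_equal_index_seg_sub_py := by
  intro seg indx _ hpre
  unfold Spec_index_seg_sub_py
  exact pv_main seg indx hpre
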